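-- pv_equiv track=rewrite | github.com/metasake/rover_commands_decryption | rover_commands_decryption.py | decrypt_command
-- ===== SOURCE A (Python) =====
-- def decrypt_command(encrypted_command: str) -> str:
--     """
--     Дешифруй строку команд для ровера.
--
--     :param encrypted_command: Шифрованная инструкция.
--     :return: Полная строка команд.
--     """
--     stack: list[tuple[int, str]] = []
--     current_number: str = ''
--     current_decryption: str = ''
--
--     for character in encrypted_command:
--         if '0' <= character <= '9':
--             current_number += character
--         elif character == '[':
--             stack.append((int(current_number), current_decryption))
--             current_number = ''
--             current_decryption = ''
--         elif character == ']':
--             previous_number, previous_decryption = stack.pop()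
--             current_decryption = (
--                 previous_decryption
--                 + current_decryption * previous_number
--             )
--         else:
--             current_decryption += character
--
--     return current_decryption
-- ===== SOURCE B (Python) =====
-- def decrypt_command(encrypted_command: str) -> str:
--     """Recursive-descent decoder: a shared index walks the string once; each
--     bracket group is decoded by a recursive call that returns at its ']'."""
--
--     def decode(i: int) -> tuple[str, int]:
--         parts: list[str] = []
--         number = ''
--         while i < len(encrypted_command):
--             character = encrypted_command[i]
--             if '0' <= character <= '9':
--                 number += character
--                 i += 1
--             elif character == '[':
--                 inner, i = decode(i + 1)
--                 parts.append(int(number) * inner)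
--                 number = ''
--             elif character == ']':
--                 return ''.join(parts), i + 1
--             else:
--                 parts.append(character)
--                 i += 1
--         return ''.join(parts), i
--
--     return decode(0)[0]
-- ===== Notes on version B (the rewrite author's own statement) =====
-- stated objective: alternative
-- what changed: A's single-pass explicit stack machine (tuples of pending multiplier/prefix pushed on '[' and popped on ']') is replaced by a recursive-descent decoder: one shared cursor walks the string once and each bracket group is decoded by a recursive call that returns its expansion at the matching ']'.
-- outside the precondition, e.g. on decrypt_command(']'): A raises IndexError, B returns ''; on decrypt_command('ab2[cd'): A returns 'cd', B returns 'abcdcd'; on decrypt_command('2[3]4[x]'): A returns 'xxxxxxxxxxxxxxxxxxxxxxxxxxxxxxxxxx', B returns 'xxxx'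
import Mathlib
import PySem

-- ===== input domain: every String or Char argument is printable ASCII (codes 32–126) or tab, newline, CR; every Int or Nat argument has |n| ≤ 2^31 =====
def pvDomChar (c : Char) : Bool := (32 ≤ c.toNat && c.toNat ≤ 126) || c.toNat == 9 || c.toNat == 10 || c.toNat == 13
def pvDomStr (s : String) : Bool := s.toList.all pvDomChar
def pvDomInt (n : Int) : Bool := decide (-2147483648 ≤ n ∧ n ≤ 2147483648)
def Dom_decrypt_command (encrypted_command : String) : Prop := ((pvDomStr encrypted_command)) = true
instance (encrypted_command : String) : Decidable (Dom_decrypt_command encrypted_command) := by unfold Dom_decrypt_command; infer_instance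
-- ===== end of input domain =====

-- B replaces A's explicit stack machine by a recursive-descent decoder sharing one cursor (objective: alternative decomposition, same cost).

-- ===== PORT A =====
-- '0' <= character <= '9'
def pvIsDig (c : Char) : Bool := ('0' ≤ c && c ≤ '9')

-- one iteration of A's for-loop over (stack, current_number, current_decryption); strings kept as List Char
def pvStepA (st : List (Int × List Char) × List Char × List Char) (c : Char) :
    List (Int × List Char) × List Char × List Char :=
  if pvIsDig c then (st.1, st.2.1 ++ [c], st.2.2)
  else if c = '[' then
    (((PySem.Int.ofStr? (String.mk st.2.1)).getD 0, st.2.2) :: st.1, [], [])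
  else if c = ']' then
    match st.1 with
    | (pn, ps) :: rest => (rest, st.2.1, ps ++ PySem.List.pyRepeat st.2.2 pn)
    | [] => st  -- stack.pop() on empty stack: IndexError in Python, excluded by Pre_
  else (st.1, st.2.1, st.2.2 ++ [c])

def decrypt_command (encrypted_command : String) : String :=
  String.mk (encrypted_command.toList.foldl pvStepA ([], [], [])).2.2

-- ===== PORT B =====
-- Source B's decode: walk the remaining characters of one frame, collecting parts and the
-- current number; on '[' recurse, on ']' (or end) return (output, rest after the ']').
-- fuel = characters left merely makes the recursion structural; it is never exhausted.
def pvDecode (fuel : Nat) (cs : List Char) (num : List Char) (parts : List Char) :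
    List Char × List Char :=
  match fuel, cs with
  | 0, cs => (parts, cs)
  | _ + 1, [] => (parts, [])
  | f + 1, c :: rest =>
    if pvIsDig c then pvDecode f rest (num ++ [c]) parts
    else if c = '[' then
      let r := pvDecode f rest [] []
      pvDecode f r.2 [] (parts ++ PySem.List.pyRepeat r.1 ((PySem.Int.ofStr? (String.mk num)).getD 0))
    else if c = ']' then (parts, rest)
    else pvDecode f rest num (parts ++ [c])

def decrypt_command_alt (encrypted_command : String) : String :=
  String.mk (pvDecode encrypted_command.toList.length encrypted_command.toList [] []).1

-- ===== PRECONDITION & SPEC =====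
-- Pre_ admits well-formed command strings: brackets balanced and every digit run feeding
-- the next '[' without a ']' in between.  It excludes (i) strings on which A raises
-- (unmatched ']' → IndexError; '[' with no pending digits → ValueError) and (ii) strings
-- where A still returns but only out of surviving loop state — an unmatched '[' silently
-- discards the prefix, and digits left over across a ']' leak into a later multiplier —
-- accidents of A's single number/decryption buffers that no caller could rely on.
-- depth = open brackets, d = "a digit is pending since the last '['"
def pvPreScan (cs : List Char) (depth : Nat) (d : Bool) : Bool :=
  match cs with
  | [] => depth == 0
  | c :: rest =>
    if pvIsDig c then pvPreScan rest depth true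
    else if c = '[' then d && pvPreScan rest (depth + 1) false
    else if c = ']' then
      match depth with
      | 0 => false
      | dp + 1 => !d && pvPreScan rest dp false
    else pvPreScan rest depth d

def Pre_decrypt_command (encrypted_command : String) : Prop :=
  pvPreScan encrypted_command.toList 0 false = true

instance (encrypted_command : String) : Decidable (Pre_decrypt_command encrypted_command) := by
  unfold Pre_decrypt_command; infer_instance

def pvWitness_decrypt_command : String := "go2[a10[b]]stop"

def Spec_decrypt_command (encrypted_command : String) (out : String) : Prop :=
  out = decrypt_command_alt encrypted_command
instance (encrypted_command : String) (out : String) : Decidable (Spec_decrypt_command encrypted_command out) := by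
  unfold Spec_decrypt_command; infer_instance

-- ===== CLAIM (what is proved, stated in full; the proofs are below) =====
def Claim_equal_decrypt_command : Prop := ∀ (encrypted_command : String), Dom_decrypt_command encrypted_command → Pre_decrypt_command encrypted_command → Spec_decrypt_command encrypted_command (decrypt_command encrypted_command)

-- ===== LEMMAS AND PROOFS =====

theorem pvIsDig_open : pvIsDig '[' = false := by decide
theorem pvIsDig_close : pvIsDig ']' = false := by decide

-- the parts accumulator is only appended to
theorem pvDecode_parts (fuel : Nat) :
    ∀ (cs num parts : List Char),
      pvDecode fuel cs num parts =
        (parts ++ (pvDecode fuel cs num []).1, (pvDecode fuel cs num []).2) := by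
  induction fuel with
  | zero => intro cs num parts; simp [pvDecode]
  | succ f ih =>
    intro cs num parts
    cases cs with
    | nil => simp [pvDecode]
    | cons c rest =>
      by_cases hd : pvIsDig c
      · simp only [pvDecode, hd, if_true]
        exact ih rest (num ++ [c]) parts
      · by_cases ho : c = '['
        · subst ho
          simp only [pvDecode, pvIsDig_open, if_false, if_true, Bool.false_eq_true]
          rw [ih (pvDecode f rest [] []).2 []
              (parts ++ PySem.List.pyRepeat (pvDecode f rest [] []).1
                ((PySem.Int.ofStr? (String.mk num)).getD 0)),
              ih (pvDecode f rest [] []).2 []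
              ([] ++ PySem.List.pyRepeat (pvDecode f rest [] []).1
                ((PySem.Int.ofStr? (String.mk num)).getD 0))]
          simp
        · by_cases hc : c = ']'
          · subst hc
            simp [pvDecode, pvIsDig_close]
          · simp only [pvDecode, hd, ho, hc, if_false, Bool.false_eq_true]
            rw [ih rest num (parts ++ [c]), ih rest num ([] ++ [c])]
            simp

-- frame lemma: a frame that the scan accepts at positive depth ends at its ']' and the two
-- machines advance in lock-step through it
theorem pvFrame (fuel : Nat) :
    ∀ (cs num : List Char) (k : Nat) (d : Bool),
      cs.length ≤ fuel →
      pvPreScan cs (k + 1) d = true →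
      (d = false → num = []) →
      (∃ a, cs = a ++ ']' :: (pvDecode fuel cs num []).2) ∧
      pvPreScan (pvDecode fuel cs num []).2 k false = true ∧
      (∀ (stack : List (Int × List Char)) (cur : List Char) (pn : Int) (ps : List Char),
        cs.foldl pvStepA ((pn, ps) :: stack, num, cur)
          = (pvDecode fuel cs num []).2.foldl pvStepA
              (stack, ([] : List Char),
               ps ++ PySem.List.pyRepeat (cur ++ (pvDecode fuel cs num []).1) pn)) := by
  induction fuel with
  | zero =>
    intro cs num k d hlen hpre hnum
    have : cs = [] := List.eq_nil_of_length_eq_zero (Nat.le_zero.mp hlen)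
    subst this; simp [pvPreScan] at hpre
  | succ f ih =>
    intro cs num k d hlen hpre hnum
    cases cs with
    | nil => simp [pvPreScan] at hpre
    | cons c rest =>
      have hlen' : rest.length ≤ f := by simp at hlen; omega
      by_cases hd : pvIsDig c
      · -- digit: both machines append to num
        have hdec : pvDecode (f + 1) (c :: rest) num [] = pvDecode f rest (num ++ [c]) [] := by
          simp [pvDecode, hd]
        simp only [pvPreScan, hd, if_true] at hpre
        obtain ⟨⟨a, ha⟩, hsc, hfold⟩ :=
          ih rest (num ++ [c]) k true hlen' hpre (fun h => Bool.noConfusion h)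
        rw [hdec]
        refine ⟨⟨c :: a, ?_⟩, hsc, ?_⟩
        · conv_lhs => rw [ha]
          simp
        
        intro stack cur pn ps
        have hstep : pvStepA ((pn, ps) :: stack, num, cur) c
            = ((pn, ps) :: stack, num ++ [c], cur) := by simp [pvStepA, hd]
        rw [List.foldl_cons, hstep]
        exact hfold stack cur pn ps
      · by_cases ho : c = '['
        · -- open bracket: B recurses, A pushes
          subst ho
          simp only [pvPreScan, pvIsDig_open, Bool.false_eq_true, if_false, if_true,
            Bool.and_eq_true] at hpre
          obtain ⟨hdT, hz⟩ := hpre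
          obtain ⟨⟨a₁, ha₁⟩, hsc₁, hfold₁⟩ :=
            ih rest [] (k + 1) false hlen' hz (fun _ => rfl)
          have hlen₁ : (pvDecode f rest [] []).2.length ≤ f := by
            have := congrArg List.length ha₁
            simp at this; omega
          obtain ⟨⟨a₂, ha₂⟩, hsc₂, hfold₂⟩ :=
            ih (pvDecode f rest [] []).2 [] k false hlen₁ hsc₁ (fun _ => rfl)
          have hdec : pvDecode (f + 1) ('[' :: rest) num []
              = (PySem.List.pyRepeat (pvDecode f rest [] []).1
                    ((PySem.Int.ofStr? (String.mk num)).getD 0)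
                  ++ (pvDecode f (pvDecode f rest [] []).2 [] []).1,
                 (pvDecode f (pvDecode f rest [] []).2 [] []).2) := by
            simp only [pvDecode, pvIsDig_open, Bool.false_eq_true, if_false, if_true]
            rw [pvDecode_parts f (pvDecode f rest [] []).2 []]
            simp
          rw [hdec]
          refine ⟨⟨'[' :: a₁ ++ ']' :: a₂, ?_⟩, hsc₂, ?_⟩
          · rw [ha₂] at ha₁
            conv_lhs => rw [ha₁]
            simp
          
          intro stack cur pn ps
          have hstep : pvStepA ((pn, ps) :: stack, num, cur) '['
              = (((PySem.Int.ofStr? (String.mk num)).getD 0, cur) :: (pn, ps) :: stack,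
                 [], []) := by
            simp [pvStepA, pvIsDig_open]
          rw [List.foldl_cons, hstep,
            hfold₁ ((pn, ps) :: stack) [] ((PySem.Int.ofStr? (String.mk num)).getD 0) cur,
            hfold₂ stack
              (cur ++ PySem.List.pyRepeat ([] ++ (pvDecode f rest [] []).1)
                ((PySem.Int.ofStr? (String.mk num)).getD 0)) pn ps]
          simp
        · by_cases hc : c = ']'
          · -- close bracket: the frame ends here
            subst hc
            cases d with
            | true => simp [pvPreScan, pvIsDig_close] at hpre
            | false =>
            have hsr : pvPreScan rest k false = true := by
              simpa [pvPreScan, pvIsDig_close] using hpre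
            have hnum0 : num = [] := hnum rfl
            subst hnum0
            have hdec : pvDecode (f + 1) (']' :: rest) ([] : List Char) [] = ([], rest) := by
              simp [pvDecode, pvIsDig_close]
            rw [hdec]
            refine ⟨⟨[], rfl⟩, hsr, ?_⟩
            intro stack cur pn ps
            have hstep : pvStepA ((pn, ps) :: stack, ([] : List Char), cur) ']'
                = (stack, [], ps ++ PySem.List.pyRepeat cur pn) := by
              simp [pvStepA, pvIsDig_close]
            rw [List.foldl_cons, hstep]
            simp
          · -- plain character
            have hdec : pvDecode (f + 1) (c :: rest) num []
                = ([c] ++ (pvDecode f rest num []).1, (pvDecode f rest num []).2) := by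
              simp only [pvDecode, hd, ho, hc, Bool.false_eq_true, if_false]
              rw [List.nil_append, pvDecode_parts f rest num [c]]
            simp only [pvPreScan, hd, ho, hc, Bool.false_eq_true, if_false] at hpre
            obtain ⟨⟨a, ha⟩, hsc, hfold⟩ := ih rest num k d hlen' hpre hnum
            rw [hdec]
            refine ⟨⟨c :: a, ?_⟩, hsc, ?_⟩
            · conv_lhs => rw [ha]
              simp
            
            intro stack cur pn ps
            have hstep : pvStepA ((pn, ps) :: stack, num, cur) c
                = ((pn, ps) :: stack, num, cur ++ [c]) := by
              simp [pvStepA, hd, ho, hc]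
            rw [List.foldl_cons, hstep, hfold stack (cur ++ [c]) pn ps]
            simp

-- top-level frame: scan accepted at depth 0, so A's fold just appends B's output
theorem pvTop (fuel : Nat) :
    ∀ (cs num : List Char) (d : Bool),
      cs.length ≤ fuel →
      pvPreScan cs 0 d = true →
      (d = false → num = []) →
      ∀ (stack : List (Int × List Char)) (cur : List Char),
        (cs.foldl pvStepA (stack, num, cur)).2.2 = cur ++ (pvDecode fuel cs num []).1 := by
  induction fuel with
  | zero =>
    intro cs num d hlen hpre hnum stack cur
    have : cs = [] := List.eq_nil_of_length_eq_zero (Nat.le_zero.mp hlen)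
    subst this; simp [pvDecode]
  | succ f ih =>
    intro cs num d hlen hpre hnum stack cur
    cases cs with
    | nil => simp [pvDecode]
    | cons c rest =>
      have hlen' : rest.length ≤ f := by simp at hlen; omega
      by_cases hd : pvIsDig c
      · have hdec : pvDecode (f + 1) (c :: rest) num [] = pvDecode f rest (num ++ [c]) [] := by
          simp [pvDecode, hd]
        simp only [pvPreScan, hd, if_true] at hpre
        have hstep : pvStepA (stack, num, cur) c = (stack, num ++ [c], cur) := by
          simp [pvStepA, hd]
        rw [hdec, List.foldl_cons, hstep]
        exact ih rest (num ++ [c]) true hlen' hpre (fun h => Bool.noConfusion h) stack cur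
      · by_cases ho : c = '['
        · subst ho
          simp only [pvPreScan, pvIsDig_open, Bool.false_eq_true, if_false, if_true,
            Bool.and_eq_true] at hpre
          obtain ⟨hdT, hz⟩ := hpre
          obtain ⟨⟨a₁, ha₁⟩, hsc₁, hfold₁⟩ :=
            pvFrame f rest [] 0 false hlen' hz (fun _ => rfl)
          have hlen₁ : (pvDecode f rest [] []).2.length ≤ f := by
            have := congrArg List.length ha₁
            simp at this; omega
          have hdec : pvDecode (f + 1) ('[' :: rest) num []
              = (PySem.List.pyRepeat (pvDecode f rest [] []).1
                    ((PySem.Int.ofStr? (String.mk num)).getD 0)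
                  ++ (pvDecode f (pvDecode f rest [] []).2 [] []).1,
                 (pvDecode f (pvDecode f rest [] []).2 [] []).2) := by
            simp only [pvDecode, pvIsDig_open, Bool.false_eq_true, if_false, if_true]
            rw [pvDecode_parts f (pvDecode f rest [] []).2 []]
            simp
          have hstep : pvStepA (stack, num, cur) '['
              = (((PySem.Int.ofStr? (String.mk num)).getD 0, cur) :: stack, [], []) := by
            simp [pvStepA, pvIsDig_open]
          rw [hdec, List.foldl_cons, hstep,
            hfold₁ stack [] ((PySem.Int.ofStr? (String.mk num)).getD 0) cur,
            ih (pvDecode f rest [] []).2 [] false hlen₁ hsc₁ (fun _ => rfl) stack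
              (cur ++ PySem.List.pyRepeat ([] ++ (pvDecode f rest [] []).1)
                ((PySem.Int.ofStr? (String.mk num)).getD 0))]
          simp
        · by_cases hc : c = ']'
          · subst hc
            simp [pvPreScan, pvIsDig_close] at hpre
          · have hdec : pvDecode (f + 1) (c :: rest) num []
                = ([c] ++ (pvDecode f rest num []).1, (pvDecode f rest num []).2) := by
              simp only [pvDecode, hd, ho, hc, Bool.false_eq_true, if_false]
              rw [List.nil_append, pvDecode_parts f rest num [c]]
            simp only [pvPreScan, hd, ho, hc, Bool.false_eq_true, if_false] at hpre
            have hstep : pvStepA (stack, num, cur) c = (stack, num, cur ++ [c]) := by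
              simp [pvStepA, hd, ho, hc]
            rw [hdec, List.foldl_cons, hstep,
              ih rest num d hlen' hpre hnum stack (cur ++ [c])]
            simp

-- ===== VERDICT (by name: the statement is the Claim_ definition above) =====
theorem decrypt_command_spec : Claim_equal_decrypt_command := by
  intro s _ hpre
  show decrypt_command s = decrypt_command_alt s
  unfold decrypt_command decrypt_command_alt
  have h := pvTop s.toList.length s.toList [] false le_rfl hpre (fun _ => rfl) [] []
  rw [h]
  simp
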